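-- pv_equiv track=rewrite | github.com/MuhammadAdil006/CompetitiveProgramming | simple/1692B.py | solve
-- ===== SOURCE A (Python) =====
-- def solve(a):
--     dic = {}
--     for i in a:
--         if dic.get(i) is not None:
--             dic[i] += 1
--         else:
--             dic[i] = 1
--     for key, values in dic.items():
--         if values % 2 == 0:
--             if values != 0:
--                 dic[key] = 2
--         else:
--             dic[key] = 1
--     summ = 0
--     twos = []
--     for i, _ in dic.items():
--         if dic[i] == 2:
--             twos.append(2)
--         else:
--             summ += 1
--     if len(twos) % 2 == 0:
--         summ += sum(twos)//2
--     else: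
--         summ += sum(twos[:len(twos)-1])//2
--     return summ
-- ===== SOURCE B (Python) =====
-- def solve(a):
--     d = len(set(a))
--     return d - (d - len(a)) % 2
-- ===== Notes on version B (the rewrite author's own statement) =====
-- stated objective: simpler
-- what changed: B drops all per-value parity bookkeeping (A's normalization pass, twos list and sum//2): it computes only d = len(set(a)) and returns d - (d - len(a)) % 2, using that the number of odd-multiplicity distinct values has the same parity as len(a).
import Mathlib
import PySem

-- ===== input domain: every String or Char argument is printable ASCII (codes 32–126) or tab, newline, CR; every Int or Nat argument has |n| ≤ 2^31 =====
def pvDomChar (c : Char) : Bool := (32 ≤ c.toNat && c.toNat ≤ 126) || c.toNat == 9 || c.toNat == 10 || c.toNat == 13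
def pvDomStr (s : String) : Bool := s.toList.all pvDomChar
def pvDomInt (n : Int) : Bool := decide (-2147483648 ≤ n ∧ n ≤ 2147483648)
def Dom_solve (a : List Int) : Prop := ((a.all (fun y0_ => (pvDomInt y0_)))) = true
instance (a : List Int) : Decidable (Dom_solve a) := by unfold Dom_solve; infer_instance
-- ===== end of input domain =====

-- B replaces A's per-value parity bookkeeping (normalize-to-1/2 pass, twos list, sum//2)
-- by the closed form d - (d - len(a)) % 2 with d = len(set(a)) (objective: simpler).


-- ===== PORT A =====
def solve (a : List Int) : Int :=
  let dic : PySem.Dict Int Int := a.foldl (fun d i =>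
    match d.get? i with
    | some v => d.insert i (v + 1)
    | none => d.insert i 1) PySem.Dict.empty
  let dic2 : PySem.Dict Int Int := dic.items.foldl (fun d kv =>
    if PySem.Int.mod kv.2 2 = 0 then
      (if kv.2 ≠ 0 then d.insert kv.1 2 else d)
    else d.insert kv.1 1) dic
  let st : Int × List Int := dic2.items.foldl (fun st kv =>
    if dic2.getD kv.1 0 = 2 then (st.1, st.2 ++ [2]) else (st.1 + 1, st.2)) (0, [])
  let summ := st.1
  let twos := st.2
  if PySem.Int.mod (twos.length : Int) 2 = 0 then
    summ + PySem.Int.floordiv twos.sum 2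
  else
    summ + PySem.Int.floordiv (PySem.List.slice twos none (some ((twos.length : Int) - 1))).sum 2

-- ===== PORT B =====
def solve_alt (a : List Int) : Int :=
  let d : Int := ((PySem.Set.ofList a).length : Int)
  d - PySem.Int.mod (d - (a.length : Int)) 2

-- ===== PRECONDITION & SPEC =====
def Spec_solve (a : List Int) (out : Int) : Prop := out = solve_alt a
instance (a : List Int) (out : Int) : Decidable (Spec_solve a out) := by unfold Spec_solve; infer_instance

-- ===== CLAIM (what is proved, stated in full; the proofs are below) =====
def Claim_equal_solve : Prop := ∀ (a : List Int), Dom_solve a → Spec_solve a (solve a)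

-- ===== LEMMAS AND PROOFS =====

-- A's counting loop builds Counter(a).
theorem solveA_counter (a : List Int) :
    a.foldl (fun (d : PySem.Dict Int Int) i =>
      match d.get? i with
      | some v => d.insert i (v + 1)
      | none => d.insert i 1) PySem.Dict.empty = PySem.Dict.counter a := by
  rw [PySem.List.foldl_congr_mem a _ (fun d x => d.insert x (d.getD x 0 + 1)) _ ?_,
      PySem.Dict.foldl_insert_getD_add_one_eq_counter]
  intro d x _
  cases h : d.get? x with
  | none => simp [PySem.Dict.getD_eq_get?_getD, h]
  | some v => simp [PySem.Dict.getD_eq_get?_getD, h]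

-- Folding "insert the current key with a new value" over the items of a nodup-key dict
-- rewrites the values in place.
theorem items_foldl_insert_map (g : Int × Int → Int) :
    ∀ (L R : List (Int × Int)) (d : PySem.Dict Int Int),
      d.keys.Nodup → d.items = R ++ L →
      (L.foldl (fun d p => d.insert p.1 (g p)) d).items = R ++ L.map (fun p => (p.1, g p)) := by
  intro L
  induction L with
  | nil => intro R d _ h; simpa using h
  | cons p L ih =>
    intro R d hnd hitems
    have hkeys : d.keys = (R ++ p :: L).map (·.1) := by
      simp only [PySem.Dict.keys, hitems]
    have hcont : d.contains p.1 = true := by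
      rw [PySem.Dict.contains_iff_mem_keys, hkeys]
      exact List.mem_map.mpr ⟨p, by simp, rfl⟩
    have hnd' : ((R ++ p :: L).map (·.1)).Nodup := hkeys ▸ hnd
    have hother : ∀ q ∈ R ++ L, q.1 ≠ p.1 := by
      intro q hq hqeq
      have hsplit : ((R.map (·.1)) ++ p.1 :: L.map (·.1)).Nodup := by simpa using hnd'
      rcases List.mem_append.mp hq with hqR | hqL
      · exact (List.nodup_append.mp hsplit).2.2 p.1 (List.mem_map.mpr ⟨q, hqR, hqeq⟩) p.1 (by simp) rfl
      · have hc : (p.1 :: L.map (·.1)).Nodup := (List.nodup_append.mp hsplit).2.1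
        exact (List.nodup_cons.mp hc).1 (List.mem_map.mpr ⟨q, hqL, hqeq⟩)
    have hf : ∀ q ∈ R ++ L,
        (if (q.1 == p.1) = true then (p.1, g p) else q) = q := by
      intro q hq; simp [hother q hq]
    have hitems' : (d.insert p.1 (g p)).items = R ++ (p.1, g p) :: L := by
      rw [PySem.Dict.items_insert_of_contains d (g p) hcont, hitems]
      simp only [List.map_append, List.map_cons, beq_self_eq_true, if_pos]
      have hR : R.map (fun q => if (q.1 == p.1) = true then (p.1, g p) else q) = R := by
        conv_rhs => rw [← List.map_id R]
        exact List.map_congr_left (fun q hq => hf q (List.mem_append_left _ hq))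
      have hL : L.map (fun q => if (q.1 == p.1) = true then (p.1, g p) else q) = L := by
        conv_rhs => rw [← List.map_id L]
        exact List.map_congr_left (fun q hq => hf q (List.mem_append_right _ hq))
      rw [hR, hL]
    have hnd2 : (d.insert p.1 (g p)).keys.Nodup := by
      have hk : (d.insert p.1 (g p)).keys = (R ++ p :: L).map (·.1) := by
        simp only [PySem.Dict.keys, hitems']
        simp
      rw [hk]; exact hnd'
    have := ih (R ++ [(p.1, g p)]) (d.insert p.1 (g p)) hnd2 (by simpa using hitems')
    simpa using this

-- A's third loop: count the non-2 values, collect a 2 for each 2-value.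
theorem third_fold (L : List (Int × Int)) :
    ∀ (s : Int) (tw : List Int),
      L.foldl (fun (st : Int × List Int) kv =>
        if kv.2 = 2 then (st.1, st.2 ++ [2]) else (st.1 + 1, st.2)) (s, tw)
      = (s + (L.countP (fun kv => !decide (kv.2 = 2)) : Int),
         tw ++ List.replicate (L.countP (fun kv => decide (kv.2 = 2))) (2 : Int)) := by
  induction L with
  | nil => intro s tw; simp
  | cons kv L ih =>
    intro s tw
    by_cases h : kv.2 = 2
    · simp [h, ih, List.replicate_succ]
    · simp [h, ih, Prod.ext_iff]
      omega

-- the value A's second loop writes for a nonzero count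
def pvNorm (v : Int) : Int := if PySem.Int.mod v 2 = 0 then 2 else 1

-- number of distinct elements of a with odd / even multiplicity
def pvOdd (a : List Int) : Nat :=
  (PySem.Set.ofList a).countP (fun k => !decide (PySem.Int.mod (a.count k) 2 = 0))
def pvEven (a : List Int) : Nat :=
  (PySem.Set.ofList a).countP (fun k => decide (PySem.Int.mod (a.count k) 2 = 0))

theorem solveA_eq (a : List Int) :
    solve a = (pvOdd a : Int) + (((pvEven a : Nat) : Int) - ((pvEven a % 2 : Nat) : Int)) := by
  simp only [solve]
  rw [solveA_counter a]
  rw [PySem.List.foldl_congr_mem ((PySem.Dict.counter a).items) _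
      (fun d p => d.insert p.1 (pvNorm p.2)) (PySem.Dict.counter a) ?hstep]
  case hstep =>
    intro d kv hm
    rw [PySem.Dict.items_counter] at hm
    obtain ⟨k, hk, rfl⟩ := List.mem_map.mp hm
    have hkmem : k ∈ a := (PySem.Set.mem_ofList a k).mp hk
    have hpos : (0 : Int) < ((a.count k : Nat) : Int) := by
      exact_mod_cast List.count_pos_iff.mpr hkmem
    have hne : a.count k ≠ 0 := (List.count_pos_iff.mpr hkmem).ne'
    simp [pvNorm, hne, apply_ite]
    split_ifs with h <;> intro hx <;> exfalso <;> omega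
  set D2 := ((PySem.Dict.counter a).items.foldl
      (fun d p => d.insert p.1 (pvNorm p.2)) (PySem.Dict.counter a)) with hD2
  have hitems2 : D2.items
      = (PySem.Set.ofList a).map (fun k => (k, pvNorm ((a.count k : Nat) : Int))) := by
    rw [hD2, items_foldl_insert_map _ (PySem.Dict.counter a).items [] (PySem.Dict.counter a)
        (PySem.Dict.nodup_keys_counter a) (by simp)]
    rw [PySem.Dict.items_counter, List.map_map]
    simp
  have hnd2 : D2.keys.Nodup := by
    have : D2.keys = (PySem.Set.ofList a).map id := by
      simp only [PySem.Dict.keys, hitems2, List.map_map]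
      rfl
    rw [this, List.map_id]
    exact PySem.Set.nodup_ofList a
  rw [PySem.List.foldl_congr_mem D2.items _
      (fun (st : Int × List Int) kv => if kv.2 = 2 then (st.1, st.2 ++ [2]) else (st.1 + 1, st.2))
      (0, []) ?hc]
  case hc =>
    intro st kv hm
    rw [PySem.Dict.getD_of_mem_items D2 (show (kv.1, kv.2) ∈ D2.items by simpa using hm) hnd2 0]
  rw [third_fold, hitems2, List.countP_map, List.countP_map]
  have hcE : ((PySem.Set.ofList a).countP
        ((fun (kv : Int × Int) => decide (kv.2 = 2)) ∘ (fun k => (k, pvNorm ((a.count k : Nat) : Int)))))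
      = pvEven a := by
    simp only [pvEven]
    apply List.countP_congr
    intro k _
    simp [pvNorm]
  have hcO : ((PySem.Set.ofList a).countP
        ((fun (kv : Int × Int) => !decide (kv.2 = 2)) ∘ (fun k => (k, pvNorm ((a.count k : Nat) : Int)))))
      = pvOdd a := by
    simp only [pvOdd]
    apply List.countP_congr
    intro k _
    simp [pvNorm]
  rw [hcE, hcO]
  simp only [List.nil_append, List.length_replicate, zero_add]
  have hmod : PySem.Int.mod ((pvEven a : Nat) : Int) 2 = ((pvEven a % 2 : Nat) : Int) := by
    exact_mod_cast PySem.Int.mod_natCast (pvEven a) 2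
  by_cases hp : pvEven a % 2 = 0
  · rw [if_pos (by rw [hmod, hp]; simp)]
    rw [List.sum_replicate, nsmul_eq_mul]
    rw [PySem.Int.floordiv_eq_ediv_of_pos (by norm_num)]
    rw [Int.mul_ediv_cancel _ (by norm_num)]
    omega
  · rw [if_neg (by rw [hmod]; omega)]
    have hE1 : 1 ≤ pvEven a := by omega
    rw [show ((pvEven a : Nat) : Int) - 1 = (((pvEven a - 1 : Nat)) : Int) by
      push_cast [hE1]; ring]
    rw [PySem.List.slice_to_natCast, List.take_replicate]
    rw [min_eq_left (by omega), List.sum_replicate, nsmul_eq_mul]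
    rw [PySem.Int.floordiv_eq_ediv_of_pos (by norm_num)]
    rw [Int.mul_ediv_cancel _ (by norm_num)]
    omega

-- Σ over a nodup superlist of the multiplicities of a's elements = a.length
theorem sum_counts : ∀ (S : List Int), S.Nodup → ∀ (a : List Int), (∀ x ∈ a, x ∈ S) →
    (S.map (fun k => a.count k)).sum = a.length := by
  intro S
  induction S with
  | nil =>
    intro _ a hsub
    cases a with
    | nil => simp
    | cons x xs => exact absurd (hsub x (by simp)) (by simp)
  | cons k S ih =>
    intro hnd a hsub
    have hknS : k ∉ S := (List.nodup_cons.mp hnd).1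
    have hndS : S.Nodup := (List.nodup_cons.mp hnd).2
    set a' := a.filter (fun x => !(x == k)) with ha'
    have hsub' : ∀ x ∈ a', x ∈ S := by
      intro x hx
      have hxa : x ∈ a := List.mem_of_mem_filter hx
      have hxk : ¬ (x = k) := by
        have := List.of_mem_filter hx
        simpa using this
      rcases List.mem_cons.mp (hsub x hxa) with h | h
      · exact absurd h hxk
      · exact h
    have hcounts : ∀ j ∈ S, a.count j = a'.count j := by
      intro j hj
      have hjk : j ≠ k := fun h => hknS (h ▸ hj)
      rw [ha', List.count_filter (by simp [hjk])]
    have hmap : S.map (fun j => a.count j) = S.map (fun j => a'.count j) :=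
      List.map_congr_left hcounts
    have hlen : a.count k + a'.length = a.length := by
      have h := a.length_eq_countP_add_countP (fun x => x == k)
      have h2 : a'.length = a.countP (fun x => decide ¬((x == k) = true)) := by
        rw [ha', ← List.countP_eq_length_filter]
        exact List.countP_congr (fun x _ => by simp)
      rw [List.count_eq_countP', h2]
      omega
    rw [List.map_cons, List.sum_cons, hmap, ih hndS a' hsub', hlen]

-- parity: the number of odd entries of a Nat list is congruent to its sum mod 2
theorem countP_odd_parity (V : List Nat) :
    V.countP (fun v => v % 2 = 1) % 2 = V.sum % 2 := by
  induction V with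
  | nil => simp
  | cons v V ih =>
    rw [List.countP_cons, List.sum_cons]
    by_cases h : v % 2 = 1 <;> simp [h] <;> omega

theorem pvOdd_parity (a : List Int) : pvOdd a % 2 = a.length % 2 := by
  have hpred : ∀ k : Int,
      (!decide (PySem.Int.mod ((a.count k : Nat) : Int) 2 = 0))
        = decide ((a.count k) % 2 = 1) := by
    intro k
    rw [show PySem.Int.mod ((a.count k : Nat) : Int) 2 = (((a.count k) % 2 : Nat) : Int) from
      by exact_mod_cast PySem.Int.mod_natCast (a.count k) 2]
    by_cases h : a.count k % 2 = 1
    · have h0 : a.count k % 2 ≠ 0 := by omega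
      simp [h]
    · have h0 : a.count k % 2 = 0 := by omega
      simp [h0]
  have h1 : pvOdd a = (PySem.Set.ofList a).countP (fun k => a.count k % 2 = 1) := by
    simp only [pvOdd]
    exact List.countP_congr (fun k _ => by rw [hpred k])
  have h2 : (PySem.Set.ofList a).countP (fun k => a.count k % 2 = 1)
      = ((PySem.Set.ofList a).map (fun k => a.count k)).countP (fun v => v % 2 = 1) := by
    rw [List.countP_map]; rfl
  have h3 := countP_odd_parity ((PySem.Set.ofList a).map (fun k => a.count k))
  have h4 := sum_counts (PySem.Set.ofList a) (PySem.Set.nodup_ofList a) a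
      (fun x hx => (PySem.Set.mem_ofList a x).mpr hx)
  rw [h1, h2, h3, h4]

theorem pvOdd_add_pvEven (a : List Int) :
    pvOdd a + pvEven a = (PySem.Set.ofList a).length := by
  simp only [pvOdd, pvEven]
  have h := (PySem.Set.ofList a).length_eq_countP_add_countP
      (fun k => decide (PySem.Int.mod ((a.count k : Nat) : Int) 2 = 0))
  have h2 : (PySem.Set.ofList a).countP
        (fun k => decide ¬((decide (PySem.Int.mod ((a.count k : Nat) : Int) 2 = 0)) = true))
      = (PySem.Set.ofList a).countP (fun k => !decide (PySem.Int.mod ((a.count k : Nat) : Int) 2 = 0)) :=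
    List.countP_congr (fun k _ => by simp)
  omega

-- ===== VERDICT (by name: the statement is the Claim_ definition above) =====
theorem solve_spec : Claim_equal_solve := by
  intro a _
  unfold Spec_solve
  rw [solveA_eq]
  show _ = (((PySem.Set.ofList a).length : Int)
      - PySem.Int.mod ((((PySem.Set.ofList a).length : Int)) - (a.length : Int)) 2)
  rw [PySem.Int.mod_eq_emod_of_pos (by norm_num)]
  have h1 := pvOdd_parity a
  have h2 := pvOdd_add_pvEven a
  omega
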